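-- pv_equiv track=rewrite | github.com/nocicadaleftbehind/adventofcode | 2015/Day_19.py | find_all_replacements
-- ===== SOURCE A (Python) =====
-- def replace_n(string, pattern, replacement, n):
--     pattern_len = len(pattern)
--     current_pattern = 0
--     current_start = 0
--     while current_pattern <= n:
--         index = string.find(pattern, current_start)
--         if current_pattern == n:
--             return string[:index] + replacement + string[index + pattern_len:]
--         else:
--             current_start = index + 1
--             current_pattern += 1
--     return string
--
-- def find_all_replacements(string, rules):
--     results = set()
--     for pattern, replacement in rules:
--         num_patterns = string.count(pattern)
--         for i in range(num_patterns):
--             replaced = replace_n(string, pattern, replacement, i)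
--             results.add(replaced)
--     return results
-- ===== SOURCE B (Python) =====
-- def find_all_replacements(string, rules):
--     results = set()
--     for pattern, replacement in rules:
--         plen = len(pattern)
--         remaining = string.count(pattern)
--         p = string.find(pattern)
--         while remaining > 0:
--             results.add(string[:p] + replacement + string[p + plen:])
--             p = string.find(pattern, p + 1)
--             remaining -= 1
--     return results
-- ===== Notes on version B (the rewrite author's own statement) =====
-- stated objective: alternative
-- what changed: A finds the i-th occurrence by re-scanning the string from the beginning for every index i (a helper doing i+1 find calls per replacement); B walks the occurrences in one continuous find loop per rule, carrying the current position forward.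
import Mathlib
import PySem

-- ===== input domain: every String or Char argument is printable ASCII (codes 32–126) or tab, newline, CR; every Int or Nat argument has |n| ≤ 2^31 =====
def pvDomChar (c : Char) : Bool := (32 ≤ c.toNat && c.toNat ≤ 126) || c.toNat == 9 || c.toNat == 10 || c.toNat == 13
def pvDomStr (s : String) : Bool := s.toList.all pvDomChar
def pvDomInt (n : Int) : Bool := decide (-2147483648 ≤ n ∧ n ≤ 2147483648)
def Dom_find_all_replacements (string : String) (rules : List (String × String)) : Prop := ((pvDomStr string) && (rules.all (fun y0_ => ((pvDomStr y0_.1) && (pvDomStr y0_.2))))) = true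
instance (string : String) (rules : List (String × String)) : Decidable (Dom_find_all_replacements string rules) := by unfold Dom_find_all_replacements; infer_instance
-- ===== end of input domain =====

-- B replaces A's per-index restarted string.find scans (A re-scans from position 0 for every
-- occurrence index) by one continuous find loop per rule that carries the position forward;
-- the returned set is provably identical.

-- ===== PORT A =====
-- the 'while current_pattern <= n' loop of replace_n
def pv_replace_loop (string pattern replacement : String) (pattern_len n current_pattern current_start : Int) : String :=
  if _h : current_pattern ≤ n then
    let index := PySem.Str.findFrom string pattern current_start
    if current_pattern = n then
      PySem.Str.slice string none (some index) ++ replacement ++ PySem.Str.slice string (some (index + pattern_len)) none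
    else
      pv_replace_loop string pattern replacement pattern_len n (current_pattern + 1) (index + 1)
  else string
termination_by (n + 1 - current_pattern).toNat
decreasing_by omega

def replace_n (string pattern replacement : String) (n : Int) : String :=
  pv_replace_loop string pattern replacement ((PySem.Str.len pattern : Int)) n 0 0

def find_all_replacements (string : String) (rules : List (String × String)) : List String :=
  rules.foldl
    (fun (results : PySem.Set String) rule =>
      let num_patterns : Int := (PySem.Str.count string rule.1 : Int)
      (PySem.List.pyRange 0 num_patterns 1).foldl
        (fun results i => PySem.Set.add results (replace_n string rule.1 rule.2 i)) results)
    PySem.Set.empty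

-- ===== PORT B =====
-- the 'while remaining > 0' loop of B
def pv_scan_loop (string pattern replacement : String) (plen remaining : Int) (results : PySem.Set String) (p : Int) : PySem.Set String :=
  if _h : 0 < remaining then
    pv_scan_loop string pattern replacement plen (remaining - 1)
      (PySem.Set.add results
        (PySem.Str.slice string none (some p) ++ replacement ++ PySem.Str.slice string (some (p + plen)) none))
      (PySem.Str.findFrom string pattern (p + 1))
  else results
termination_by remaining.toNat
decreasing_by omega

def find_all_replacements_alt (string : String) (rules : List (String × String)) : List String :=
  rules.foldl
    (fun (results : PySem.Set String) rule =>
      let plen : Int := (PySem.Str.len rule.1 : Int)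
      let remaining : Int := (PySem.Str.count string rule.1 : Int)
      pv_scan_loop string rule.1 rule.2 plen remaining results (PySem.Str.find string rule.1))
    PySem.Set.empty

-- ===== PRECONDITION & SPEC =====
def Spec_find_all_replacements (string : String) (rules : List (String × String)) (out : List String) : Prop := out = find_all_replacements_alt string rules
instance (string : String) (rules : List (String × String)) (out : List String) : Decidable (Spec_find_all_replacements string rules out) := by unfold Spec_find_all_replacements; infer_instance

-- ===== CLAIM (what is proved, stated in full; the proofs are below) =====
def Claim_equal_find_all_replacements : Prop := ∀ (string : String) (rules : List (String × String)), Dom_find_all_replacements string rules → Spec_find_all_replacements string rules (find_all_replacements string rules)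

-- ===== LEMMAS AND PROOFS =====

-- all (overlapping) occurrence positions of ps in cs, in increasing order
def pvOcc (cs ps : List Char) : List Nat :=
  (List.range ((cs.length : Int) - (ps.length : Int) + 1).toNat).filter
    (fun p => ps.isPrefixOf (cs.drop p))

-- greedy non-overlapping count over a sorted position list (= what string.count computes)
def pvG (m : Nat) : List Nat → Nat
  | [] => 0
  | p :: rest => 1 + pvG m (rest.filter (fun q => p + m ≤ q))
termination_by l => l.length
decreasing_by
  simp only [List.length_cons]
  refine Nat.lt_succ_of_le ?_
  rw [List.length_unattach]
  exact le_trans (List.length_filter_le _ _) (le_of_eq (List.length_attach))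

theorem pvOcc_sorted (cs ps : List Char) : (pvOcc cs ps).Pairwise (· < ·) := by
  unfold pvOcc
  exact (List.pairwise_lt_range).filter _

theorem mem_pvOcc (cs ps : List Char) (p : Nat) :
    p ∈ pvOcc cs ps ↔ p ≤ cs.length ∧ ps <+: cs.drop p := by
  unfold pvOcc
  simp only [List.mem_filter, List.mem_range, List.isPrefixOf_iff_prefix]
  constructor
  · rintro ⟨hr, hp⟩
    refine ⟨?_, hp⟩
    omega
  · rintro ⟨hle, hp⟩
    refine ⟨?_, hp⟩
    have := hp.length_le
    simp only [List.length_drop] at this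
    omega

theorem pvG_cons (m p : Nat) (rest : List Nat) :
    pvG m (p :: rest) = 1 + pvG m (rest.filter (fun q => p + m ≤ q)) := by
  rw [pvG]

theorem pvG_shift (m d : Nat) (os : List Nat) : pvG m (os.map (· + d)) = pvG m os := by
  induction hn : os.length using Nat.strong_induction_on generalizing os with
  | _ n ih =>
    cases os with
    | nil => simp [pvG]
    | cons p rest =>
      rw [List.map_cons, pvG_cons, pvG_cons]
      have hf : ((rest.map (· + d)).filter (fun q => p + d + m ≤ q)) =
          (rest.filter (fun q => p + m ≤ q)).map (· + d) := by
        rw [List.filter_map]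
        congr 1
        apply List.filter_congr
        intro q _
        simp only [Function.comp_apply, decide_eq_decide]
        omega
      rw [hf]
      have hlt : (rest.filter (fun q => p + m ≤ q)).length < n := by
        have := List.length_filter_le (fun q => decide (p + m ≤ q)) rest
        simp only [List.length_cons] at hn
        omega
      rw [ih _ hlt _ rfl]

theorem pvG_zero_sorted (os : List Nat) (h : os.Pairwise (· < ·)) : pvG 0 os = os.length := by
  induction os with
  | nil => simp [pvG]
  | cons p rest ih =>
    rw [pvG_cons]
    have hf : rest.filter (fun q => p + 0 ≤ q) = rest := by
      apply List.filter_eq_self.mpr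
      intro q hq
      have := (List.pairwise_cons.mp h).1 q hq
      simp only [decide_eq_true_eq]
      omega
    rw [hf, ih (List.pairwise_cons.mp h).2]
    simp [Nat.add_comm]

theorem pvG_le_length (m : Nat) (os : List Nat) : pvG m os ≤ os.length := by
  induction hn : os.length using Nat.strong_induction_on generalizing os with
  | _ n ih =>
    cases os with
    | nil => simp [pvG]
    | cons p rest =>
      rw [pvG_cons]
      have hlt : (rest.filter (fun q => p + m ≤ q)).length < n := by
        have := List.length_filter_le (fun q => decide (p + m ≤ q)) rest
        simp only [List.length_cons] at hn
        omega
      have := ih _ hlt _ rfl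
      simp only [List.length_cons] at hn ⊢
      have h2 := List.length_filter_le (fun q => decide (p + m ≤ q)) rest
      omega

theorem pvOcc_cons (c : Char) (t ps : List Char) :
    pvOcc (c :: t) ps =
      (if ps.isPrefixOf (c :: t) then [0] else []) ++ (pvOcc t ps).map (· + 1) := by
  unfold pvOcc
  by_cases hm : ps.length ≤ t.length + 1
  · have hK : (((c :: t).length : Int) - (ps.length : Int) + 1).toNat =
        (((t.length : Int) - (ps.length : Int) + 1).toNat) + 1 := by
      simp only [List.length_cons]
      omega
    rw [hK, List.range_succ_eq_map, List.filter_cons]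
    have htail : ((List.range (((t.length : Int) - (ps.length : Int) + 1).toNat)).map (· + 1)).filter
          (fun p => ps.isPrefixOf ((c :: t).drop p))
        = ((List.range (((t.length : Int) - (ps.length : Int) + 1).toNat)).filter
            (fun p => ps.isPrefixOf (t.drop p))).map (· + 1) := by
      rw [List.filter_map]
      congr 1
    rw [htail]
    simp only [List.drop_zero]
    by_cases hpre : ps.isPrefixOf (c :: t)
    · simp [hpre]
    · simp [hpre]
  · have hK : (((c :: t).length : Int) - (ps.length : Int) + 1).toNat = 0 := by
      simp only [List.length_cons]
      omega
    have hKt : (((t.length : Int) - (ps.length : Int) + 1).toNat) = 0 := by omega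
    have hpre : ps.isPrefixOf (c :: t) = false := by
      rw [Bool.eq_false_iff]
      intro hc
      have := (List.isPrefixOf_iff_prefix.mp hc).length_le
      simp only [List.length_cons] at this
      omega
    rw [hK, hKt, hpre]
    simp

theorem pvOcc_shift (cs ps : List Char) (hm : 1 ≤ ps.length) :
    ∀ (d : Nat),
      (pvOcc cs ps).filter (fun q => d ≤ q) = (pvOcc (cs.drop d) ps).map (· + d) := by
  induction cs with
  | nil =>
    intro d
    have h0 : pvOcc ([] : List Char) ps = [] := by
      unfold pvOcc
      have : (((List.length ([] : List Char)) : Int) - (ps.length : Int) + 1).toNat = 0 := by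
        simp only [List.length_nil]
        omega
      rw [this]
      simp
    simp [h0, List.drop_nil]
  | cons c t ih =>
    intro d
    cases d with
    | zero =>
      simp only [List.drop_zero]
      rw [List.filter_eq_self.mpr (by intro q _; simp)]
      have : (pvOcc (c :: t) ps).map (· + 0) = pvOcc (c :: t) ps := by
        simp
      rw [this]
    | succ d =>
      rw [pvOcc_cons]
      rw [List.filter_append]
      have h1 : (if ps.isPrefixOf (c :: t) then [0] else []).filter (fun q => d + 1 ≤ q) = [] := by
        by_cases hpre : ps.isPrefixOf (c :: t) <;> simp [hpre]
      have h2 : ((pvOcc t ps).map (· + 1)).filter (fun q => d + 1 ≤ q)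
          = ((pvOcc t ps).filter (fun q => d ≤ q)).map (· + 1) := by
        rw [List.filter_map]
        congr 1
        apply List.filter_congr
        intro q _
        simp only [Function.comp_apply, decide_eq_decide]
        omega
      rw [h1, h2, ih d]
      rw [List.map_map, List.drop_succ_cons]
      congr 1

theorem pvOcc_nil (ps : List Char) (hps : ps ≠ []) : pvOcc [] ps = [] := by
  unfold pvOcc
  have hm : 1 ≤ ps.length := List.length_pos_iff.mpr hps
  have : (((List.length ([] : List Char)) : Int) - (ps.length : Int) + 1).toNat = 0 := by
    simp only [List.length_nil]
    omega
  rw [this]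
  simp

theorem count_go_eq (ps : List Char) (hps : ps ≠ []) :
    ∀ (fuel : Nat) (l : List Char) (acc : Nat), l.length ≤ fuel →
      PySem.Chars.count.go ps fuel l acc = acc + pvG ps.length (pvOcc l ps) := by
  have hm : 1 ≤ ps.length := List.length_pos_iff.mpr hps
  intro fuel
  induction fuel with
  | zero =>
    intro l acc hl
    have : l = [] := List.eq_nil_of_length_eq_zero (by omega)
    subst this
    rw [pvOcc_nil ps hps]
    simp [PySem.Chars.count.go, pvG]
  | succ fuel ih =>
    intro l acc hl
    cases l with
    | nil =>
      rw [pvOcc_nil ps hps]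
      simp [PySem.Chars.count.go, pvG]
    | cons c t =>
      have hstep : PySem.Chars.count.go ps (fuel + 1) (c :: t) acc =
          if ps.isPrefixOf (c :: t) then PySem.Chars.count.go ps fuel ((c :: t).drop ps.length) (acc + 1)
          else PySem.Chars.count.go ps fuel t acc := rfl
      rw [hstep]
      by_cases hpre : ps.isPrefixOf (c :: t)
      · rw [if_pos hpre]
        have hlen : ((c :: t).drop ps.length).length ≤ fuel := by
          simp only [List.length_drop, List.length_cons] at *
          omega
        rw [ih _ _ hlen]
        have hocc : pvOcc (c :: t) ps = 0 :: (pvOcc t ps).map (· + 1) := by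
          rw [pvOcc_cons, if_pos hpre]
          rfl
        have hfil : ((pvOcc t ps).map (· + 1)).filter (fun q => 0 + ps.length ≤ q)
            = (pvOcc (c :: t) ps).filter (fun q => ps.length ≤ q) := by
          rw [hocc, List.filter_cons]
          have : ¬ (ps.length ≤ 0) := by omega
          simp only [decide_eq_true_eq, this, ite_false]
          congr 1
          funext q
          simp only [decide_eq_decide]
          omega
        rw [hocc, pvG_cons, hfil, pvOcc_shift _ _ hm ps.length, pvG_shift]
        omega
      · rw [if_neg hpre]
        have hlen : t.length ≤ fuel := by
          simp only [List.length_cons] at hl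
          omega
        rw [ih _ _ hlen]
        have hocc : pvOcc (c :: t) ps = (pvOcc t ps).map (· + 1) := by
          rw [pvOcc_cons, if_neg hpre]
          rfl
        rw [hocc, pvG_shift]

theorem pvOcc_nil_pat (cs : List Char) : pvOcc cs [] = List.range (cs.length + 1) := by
  unfold pvOcc
  have : (((cs.length : Int)) - ((List.length ([] : List Char)) : Int) + 1).toNat = cs.length + 1 := by
    simp only [List.length_nil]
    omega
  rw [this]
  apply List.filter_eq_self.mpr
  intro q _
  simp

theorem count_eq_pvG (cs ps : List Char) :
    PySem.Chars.count cs ps = pvG ps.length (pvOcc cs ps) := by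
  have hdef : PySem.Chars.count cs ps =
      if ps.isEmpty then cs.length + 1 else PySem.Chars.count.go ps cs.length cs 0 := rfl
  rw [hdef]
  by_cases hps : ps = []
  · subst hps
    rw [if_pos (by simp), pvOcc_nil_pat]
    have : ([] : List Char).length = 0 := rfl
    rw [this, pvG_zero_sorted _ (List.pairwise_lt_range)]
    simp
  · rw [if_neg (by simpa using hps)]
    rw [count_go_eq ps hps cs.length cs 0 le_rfl]
    simp

-- sorted lists: filtering by "greater than the j-th element" is dropping j+1 elements
theorem head_min_of_drop (l : List Nat) (h : l.Pairwise (· < ·)) (j : Nat) (hj : j < l.length)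
    (x : Nat) (hx : x ∈ l.drop j) : l[j] ≤ x := by
  rw [List.mem_iff_getElem] at hx
  obtain ⟨i, hi, hix⟩ := hx
  rw [List.getElem_drop] at hix
  subst hix
  rcases Nat.eq_zero_or_pos i with h0 | h0
  · subst h0
    simp
  · have := (List.pairwise_iff_getElem.mp h) j (j + i) (by omega)
      (by simp only [List.length_drop] at hi; omega) (by omega)
    omega

theorem filter_succ_drop (l : List Nat) (h : l.Pairwise (· < ·)) (j : Nat) (hj : j < l.length) :
    l.filter (fun q => l[j] + 1 ≤ q) = l.drop (j + 1) := by
  have hpw := List.pairwise_iff_getElem.mp h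
  have hup : ∀ x ∈ l.take (j + 1), x ≤ l[j] := by
    intro x hx
    rw [List.mem_iff_getElem] at hx
    obtain ⟨i, hi, hix⟩ := hx
    rw [List.getElem_take] at hix
    subst hix
    have hil : i < l.length := by
      simp only [List.length_take] at hi
      omega
    rcases Nat.lt_or_ge i j with hlt | hge
    · exact le_of_lt (hpw i j hil hj hlt)
    · have : i = j := by
        simp only [List.length_take] at hi
        omega
      subst this
      rfl
  have hlo : ∀ x ∈ l.drop (j + 1), l[j] + 1 ≤ x := by
    intro x hx
    rw [List.mem_iff_getElem] at hx
    obtain ⟨i, hi, hix⟩ := hx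
    rw [List.getElem_drop] at hix
    subst hix
    have := hpw j (j + 1 + i) hj (by simp only [List.length_drop] at hi; omega) (by omega)
    omega
  generalize hA : l[j] = A at hup hlo ⊢
  conv_lhs => rw [← List.take_append_drop (j + 1) l]
  rw [List.filter_append]
  rw [List.filter_eq_nil_iff.mpr (by
    intro x hx
    simp only [decide_eq_true_eq]
    have := hup x hx
    omega)]
  rw [List.filter_eq_self.mpr (by
    intro x hx
    simp only [decide_eq_true_eq]
    exact hlo x hx)]
  simp

-- string.find(pattern, start) returns the first occurrence position ≥ start
theorem findFrom_occ (string pattern : String) (start j : Nat)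
    (hstart : start ≤ string.toList.length)
    (hj : j < (pvOcc string.toList pattern.toList).length)
    (hinv : (pvOcc string.toList pattern.toList).filter (fun q => start ≤ q) =
            (pvOcc string.toList pattern.toList).drop j) :
    PySem.Str.findFrom string pattern (start : Int) =
      ((pvOcc string.toList pattern.toList)[j] : Int) := by
  set cs := string.toList with hcs
  set ps := pattern.toList with hps
  set l := pvOcc cs ps with hl
  have hjd : l[j] ∈ l.drop j := by
    rw [List.mem_iff_getElem]
    exact ⟨0, by simp only [List.length_drop]; omega, by rw [List.getElem_drop]; simp⟩
  have hjf : l[j] ∈ l.filter (fun q => start ≤ q) := by rw [hinv]; exact hjd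
  have hjmem : l[j] ∈ l := (List.mem_filter.mp hjf).1
  have hjstart : start ≤ l[j] := by
    have := (List.mem_filter.mp hjf).2
    simpa using this
  obtain ⟨hjn, hjpre⟩ := (mem_pvOcc cs ps _).mp hjmem
  have hdd : (cs.drop start).drop (l[j] - start) = cs.drop l[j] := by
    rw [List.drop_drop]
    congr 1
    omega
  have hinf : ps <:+: cs.drop start := by
    obtain ⟨tl, htl⟩ := hjpre
    exact ⟨(cs.drop start).take (l[j] - start), tl, by
      rw [List.append_assoc, htl, ← hdd, List.take_append_drop]⟩
  have hfind_ne : PySem.Chars.find (cs.drop start) ps ≠ -1 :=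
    (PySem.Chars.find_ne_neg_one_iff _ _).mpr hinf
  have hfind_nonneg : 0 ≤ PySem.Chars.find (cs.drop start) ps :=
    (PySem.Chars.find_nonneg_iff _ _).mpr hinf
  obtain ⟨hfpre, hfmin⟩ := PySem.Chars.find_spec hfind_nonneg
  set r := (PySem.Chars.find (cs.drop start) ps).toNat with hr
  have hrlen : (r : Int) ≤ (cs.drop start).length := by
    have := PySem.Chars.find_le_length (cs.drop start) ps
    omega
  have hp0n : start + r ≤ cs.length := by
    simp only [List.length_drop] at hrlen
    omega
  have hp0pre : ps <+: cs.drop (start + r) := by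
    rw [← List.drop_drop]
    exact hfpre
  have hp0mem : start + r ∈ l := (mem_pvOcc cs ps _).mpr ⟨hp0n, hp0pre⟩
  have hp0f : start + r ∈ l.filter (fun q => start ≤ q) := by
    rw [List.mem_filter]
    exact ⟨hp0mem, by simp⟩
  have hle1 : l[j] ≤ start + r := by
    rw [hinv] at hp0f
    exact head_min_of_drop l (pvOcc_sorted cs ps) j (by omega) _ hp0f
  have hle2 : start + r ≤ l[j] := by
    by_contra hcon
    rw [not_le] at hcon
    have hidx : l[j] - start < r := by omega
    have : ¬ ps <+: (cs.drop start).drop (l[j] - start) := hfmin _ hidx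
    rw [hdd] at this
    exact this hjpre
  have heq : l[j] = start + r := by omega
  rw [PySem.Str.findFrom_eq]
  conv_lhs => rw [← hcs, ← hps]
  rw [PySem.Chars.findFrom_natCast cs ps start hstart]
  rw [if_neg hfind_ne]
  have hfr : PySem.Chars.find (List.drop start cs) ps = (r : Int) :=
    (Int.toNat_of_nonneg hfind_nonneg).symm
  show (start : Int) + PySem.Chars.find (List.drop start cs) ps = ((l[j] : Nat) : Int)
  rw [heq, hfr]
  push_cast
  ring

-- the A-side loop lands on the i-th occurrence
theorem loopA (string pattern replacement : String) :
    ∀ (d i j start : Nat)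
      (_hd : i = j + d)
      (_hstart : start ≤ string.toList.length)
      (_hinv : (pvOcc string.toList pattern.toList).filter (fun q => start ≤ q) =
        (pvOcc string.toList pattern.toList).drop j)
      (hlt : i < (pvOcc string.toList pattern.toList).length),
      pv_replace_loop string pattern replacement ((PySem.Str.len pattern : Int))
          ((i : Nat) : Int) ((j : Nat) : Int) ((start : Nat) : Int) =
        PySem.Str.slice string none (some (((pvOcc string.toList pattern.toList)[i]'hlt : Nat) : Int)) ++
          replacement ++
          PySem.Str.slice string
            (some ((((pvOcc string.toList pattern.toList)[i]'hlt : Nat) : Int) + (PySem.Str.len pattern : Int))) none := by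
  intro d
  induction d with
  | zero =>
    intro i j start hd hstart hinv hlt
    rw [pv_replace_loop]
    rw [dif_pos (show ((j : Nat) : Int) ≤ ((i : Nat) : Int) by omega)]
    dsimp only
    rw [findFrom_occ string pattern start j hstart (by omega) hinv]
    rw [if_pos (show ((j : Nat) : Int) = ((i : Nat) : Int) by omega)]
    have : j = i := by omega
    subst this
    rfl
  | succ d ih =>
    intro i j start hd hstart hinv hlt
    set l := pvOcc string.toList pattern.toList with hl
    rw [pv_replace_loop]
    rw [dif_pos (show ((j : Nat) : Int) ≤ ((i : Nat) : Int) by omega)]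
    dsimp only
    rw [findFrom_occ string pattern start j hstart (by omega) hinv]
    rw [if_neg (show ¬ (((j : Nat) : Int) = ((i : Nat) : Int)) by omega)]
    have hsort := pvOcc_sorted string.toList pattern.toList
    have hj1 : j + 1 < l.length := by omega
    have hmono : l[j] < l[j + 1] :=
      (List.pairwise_iff_getElem.mp hsort) j (j + 1) (by omega) hj1 (by omega)
    have hjn : l[j + 1] ≤ string.toList.length :=
      ((mem_pvOcc string.toList pattern.toList _).mp (List.getElem_mem hj1)).1
    have hstart' : l[j] + 1 ≤ string.toList.length := by omega
    have hinv' : l.filter (fun q => l[j] + 1 ≤ q) = l.drop (j + 1) :=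
      filter_succ_drop l hsort j (by omega)
    have hrec := ih i (j + 1) (l[j] + 1) (by omega) hstart' hinv' hlt
    push_cast at hrec
    exact hrec

-- the B-side scan loop visits the first d remaining occurrences
theorem loopB (string pattern replacement : String) :
    ∀ (d j : Nat) (p : Int) (results : PySem.Set String),
      j + d ≤ (pvOcc string.toList pattern.toList).length →
      (0 < d → p = (((pvOcc string.toList pattern.toList).getD j 0 : Nat) : Int)) →
      pv_scan_loop string pattern replacement ((PySem.Str.len pattern : Int)) ((d : Nat) : Int) results p
        = (((pvOcc string.toList pattern.toList).drop j).take d).foldl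
            (fun res q =>
              PySem.Set.add res
                (PySem.Str.slice string none (some ((q : Nat) : Int)) ++ replacement ++
                  PySem.Str.slice string (some (((q : Nat) : Int) + (PySem.Str.len pattern : Int))) none))
            results := by
  intro d
  induction d with
  | zero =>
    intro j p results hle hp
    rw [pv_scan_loop]
    rw [dif_neg (by omega)]
    simp
  | succ d ih =>
    intro j p results hle hp
    set os := pvOcc string.toList pattern.toList with hos
    have hj : j < os.length := by omega
    have hpv : p = ((os[j] : Nat) : Int) := by
      rw [hp (by omega), List.getD_eq_getElem os 0 hj]
    have hsort := pvOcc_sorted string.toList pattern.toList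
    have hjn : os[j] ≤ string.toList.length :=
      ((mem_pvOcc string.toList pattern.toList _).mp (List.getElem_mem hj)).1
    rw [pv_scan_loop]
    rw [dif_pos (by omega)]
    have hdrop : os.drop j = os[j] :: os.drop (j + 1) := List.drop_eq_getElem_cons hj
    rw [hdrop, List.take_succ_cons, List.foldl_cons]
    have hrem : ((d + 1 : Nat) : Int) - 1 = ((d : Nat) : Int) := by push_cast; ring
    rw [hrem, hpv]
    by_cases hj1 : j + 1 < os.length
    · -- the next find lands on the next occurrence
      have hmono : os[j] < os[j + 1] :=
        (List.pairwise_iff_getElem.mp hsort) j (j + 1) (by omega) hj1 (by omega)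
      have hj1n : os[j + 1] ≤ string.toList.length :=
        ((mem_pvOcc string.toList pattern.toList _).mp (List.getElem_mem hj1)).1
      have hfind : PySem.Str.findFrom string pattern (((os[j] : Nat) : Int) + 1) =
          ((os[j + 1] : Nat) : Int) := by
        have h := findFrom_occ string pattern (os[j] + 1) (j + 1) (by omega) hj1
          (filter_succ_drop os hsort j (by omega))
        push_cast at h ⊢
        exact h
      rw [hfind]
      rw [ih (j + 1) _ _ (by omega)
        (fun _ => by rw [List.getD_eq_getElem os 0 hj1])]
    · -- no occurrence left: d = 0 and the loop stops regardless of the find result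
      have hd0 : d = 0 := by omega
      subst hd0
      rw [pv_scan_loop]
      rw [dif_neg (by omega)]
      simp

-- per-rule: A's fold over occurrence indices equals B's scan loop
theorem per_rule (string pattern replacement : String) (results : PySem.Set String) :
    (PySem.List.pyRange 0 ((PySem.Str.count string pattern : Int)) 1).foldl
        (fun results i => PySem.Set.add results (replace_n string pattern replacement i)) results
      = pv_scan_loop string pattern replacement ((PySem.Str.len pattern : Int))
          ((PySem.Str.count string pattern : Int)) results (PySem.Str.find string pattern) := by
  set os := pvOcc string.toList pattern.toList with hos
  set m := pattern.toList.length with hm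
  set g := pvG m os with hg
  have hsort := pvOcc_sorted string.toList pattern.toList
  have hgle : g ≤ os.length := pvG_le_length m os
  have hc : (PySem.Str.count string pattern : Int) = ((g : Nat) : Int) := by
    rw [PySem.Str.count_eq, count_eq_pvG, ← hos, ← hm, ← hg]
  rw [hc, PySem.List.pyRange_one]
  simp only [Int.sub_zero, Int.toNat_natCast, zero_add]
  -- A side: the fold over indices is the fold over the first g occurrence positions
  have hmap : (List.range g).map (fun i => replace_n string pattern replacement ((i : Nat) : Int))
      = (os.take g).map (fun p =>
          PySem.Str.slice string none (some ((p : Nat) : Int)) ++ replacement ++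
            PySem.Str.slice string (some (((p : Nat) : Int) + (PySem.Str.len pattern : Int))) none) := by
    apply List.ext_getElem
    · simp only [List.length_map, List.length_range, List.length_take]
      omega
    · intro i h1 h2
      simp only [List.getElem_map, List.getElem_range, List.getElem_take]
      have hlt : i < os.length := by
        simp only [List.length_map, List.length_range] at h1
        exact lt_of_lt_of_le h1 hgle
      have hrec := loopA string pattern replacement i i 0 0 (by omega) (Nat.zero_le _)
        (by rw [List.filter_eq_self.mpr (by intro q _; simp), List.drop_zero]) hlt
      push_cast at hrec
      unfold replace_n
      exact hrec
  -- B side: the scan loop over g steps is the fold over the first g occurrence positions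
  have hB : pv_scan_loop string pattern replacement ((PySem.Str.len pattern : Int))
        ((g : Nat) : Int) results (PySem.Str.find string pattern)
      = ((os.drop 0).take g).foldl
          (fun res q =>
            PySem.Set.add res
              (PySem.Str.slice string none (some ((q : Nat) : Int)) ++ replacement ++
                PySem.Str.slice string (some (((q : Nat) : Int) + (PySem.Str.len pattern : Int))) none))
          results := by
    apply loopB string pattern replacement g 0 _ results (by simpa using hgle)
    intro hgpos
    have h0 : 0 < os.length := by omega
    have hfind : PySem.Str.findFrom string pattern ((0 : Nat) : Int) = ((os[0] : Nat) : Int) :=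
      findFrom_occ string pattern 0 0 (Nat.zero_le _) h0
        (by rw [List.filter_eq_self.mpr (by intro q _; simp), List.drop_zero])
    rw [PySem.Str.findFrom_eq] at hfind
    rw [Nat.cast_zero] at hfind
    rw [PySem.Chars.findFrom_zero] at hfind
    rw [PySem.Str.find_eq, hfind, List.getD_eq_getElem os 0 h0]
  rw [hB, List.drop_zero]
  rw [List.foldl_map]
  conv_rhs => rw [← List.foldl_map]
  rw [← hmap]
  exact List.foldl_map.symm

-- ===== VERDICT (by name: the statement is the Claim_ definition above) =====
theorem find_all_replacements_spec : Claim_equal_find_all_replacements := by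
  intro string rules _
  unfold Spec_find_all_replacements find_all_replacements find_all_replacements_alt
  refine congrFun (congrFun (congrArg _ ?_) _) _
  funext results rule
  exact per_rule string rule.1 rule.2 results
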